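-- pv_equiv track=rewrite | github.com/hewei198711/xmind_to_csv | testcase_xmind_to_csv.py | find_step_and_expectation
-- ===== SOURCE A (Python) =====
-- def find_step_and_expectation(caselist):
--     "caselist 把测试步骤和期望拆解出来"
--
--     # 把每条数据拆分成 标题 测试步骤 预期
--     caselist02 = []
--     for title in caselist:
--         case = title.split("_")
--         casetitle = "_".join(case[:-2])
--         caselist02.append([casetitle, case[-2], case[-1]])
--
--     # 把相同标题的数据中的 测试步骤 预期 合并, ['title', '步骤一\n步骤二', '预期一\n预期二']
--     caselist03 = []
--     if caselist03:
--         title = caselist03[-1][0]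
--     else:
--         title = ""
--     for case in caselist02:
--         if caselist03:
--             if case[0] == title:
--                 caselist03[-1][1] += f"\n{case[1]}"
--                 caselist03[-1][2] += f"\n{case[2]}"
--             else:
--                 caselist03.append(case)
--                 title = caselist03[-1][0]
--         else:
--             caselist03.append(case)
--             title = caselist03[-1][0]
--
--     return caselist03
-- ===== SOURCE B (Python) =====
-- def find_step_and_expectation(caselist):
--     "caselist 把测试步骤和期望拆解出来"
--     # phase 1: one row [title, step, expectation] per case
--     rows = []
--     for title in caselist:
--         case = title.split("_")
--         rows.append(["_".join(case[:-2]), case[-2], case[-1]])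
--     # phase 2: group maximal runs of equal titles with two pointers, join each run at once
--     merged = []
--     i = 0
--     n = len(rows)
--     while i < n:
--         j = i
--         while j < n and rows[j][0] == rows[i][0]:
--             j += 1
--         run = rows[i:j]
--         merged.append([rows[i][0],
--                        "\n".join(r[1] for r in run),
--                        "\n".join(r[2] for r in run)])
--         i = j
--     return merged
-- ===== Notes on version B (the rewrite author's own statement) =====
-- stated objective: idiomatic
-- what changed: The stateful merge loop that mutates the last appended row's fields in place is replaced by a two-pointer scan that takes each maximal run of equal adjacent titles and joins its steps/expectations in one go.
import Mathlib
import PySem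

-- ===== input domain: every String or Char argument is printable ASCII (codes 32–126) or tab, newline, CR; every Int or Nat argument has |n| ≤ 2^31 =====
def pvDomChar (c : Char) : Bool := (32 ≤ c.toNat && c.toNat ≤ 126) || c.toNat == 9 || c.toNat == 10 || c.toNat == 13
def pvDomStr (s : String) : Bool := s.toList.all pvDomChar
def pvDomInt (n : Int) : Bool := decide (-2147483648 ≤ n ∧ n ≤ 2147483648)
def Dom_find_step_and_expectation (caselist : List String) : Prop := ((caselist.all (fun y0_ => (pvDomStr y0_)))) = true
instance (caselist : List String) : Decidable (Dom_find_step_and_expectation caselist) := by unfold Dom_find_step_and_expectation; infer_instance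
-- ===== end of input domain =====

-- B replaces A's stateful merge loop (which mutates the last appended row in place) by a
-- two-pointer/run-grouping scan that joins each maximal run of equal adjacent titles at once
-- (objective: idiomatic; same cost).

-- ===== PORT A =====
-- transcription of `caselist03[-1][1] += …; caselist03[-1][2] += …`:
-- the last row (a 3-element list) is rebuilt with fields 1 and 2 extended
def pvSetLast (xs : List (List String)) (f : List String → List String) : List (List String) :=
  match xs with
  | [] => []
  | [x] => [f x]
  | x :: y :: rest => x :: pvSetLast (y :: rest) f

def pvMergeStep (st : List (List String) × String) (case_ : List String) : List (List String) × String :=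
  if st.1 ≠ [] then                                         -- if caselist03:
    if (PySem.List.pyGet? case_ 0).getD "" = st.2 then      --   if case[0] == title:
      (pvSetLast st.1 (fun row =>
        [(PySem.List.pyGet? row 0).getD "",
         (PySem.List.pyGet? row 1).getD "" ++ ("\n" ++ (PySem.List.pyGet? case_ 1).getD ""),
         (PySem.List.pyGet? row 2).getD "" ++ ("\n" ++ (PySem.List.pyGet? case_ 2).getD "")]), st.2)
    else                                                    --   else: append; title = caselist03[-1][0]
      (st.1 ++ [case_],
       (PySem.List.pyGet? ((PySem.List.pyGet? (st.1 ++ [case_]) (-1)).getD []) 0).getD "")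
  else                                                      -- else: append; title = caselist03[-1][0]
    (st.1 ++ [case_],
     (PySem.List.pyGet? ((PySem.List.pyGet? (st.1 ++ [case_]) (-1)).getD []) 0).getD "")

def find_step_and_expectation (caselist : List String) : List (List String) :=
  -- phase 1: for title in caselist: case = title.split("_"); append [ "_".join(case[:-2]), case[-2], case[-1] ]
  -- (case[-2] / case[-1] raise IndexError when the title has no "_": excluded by Pre_; getD "" is unreachable inside Pre_)
  let caselist02 := caselist.foldl (fun acc title =>
    let case_ := (PySem.Str.split? title "_").getD []
    let casetitle := PySem.Str.join "_" (PySem.List.slice case_ none (some (-2)))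
    acc ++ [[casetitle, (PySem.List.pyGet? case_ (-2)).getD "", (PySem.List.pyGet? case_ (-1)).getD ""]]) []
  -- phase 2: the stateful merge loop
  (caselist02.foldl pvMergeStep ([], "")).1

-- ===== PORT B =====
def pvRowOf (title : String) : List String :=
  let case_ := (PySem.Str.split? title "_").getD []
  [PySem.Str.join "_" (PySem.List.slice case_ none (some (-2))),
   (PySem.List.pyGet? case_ (-2)).getD "",
   (PySem.List.pyGet? case_ (-1)).getD ""]

-- Source B's two-pointer run grouping: the inner `while j < n and rows[j][0] == rows[i][0]`
-- scan is takeWhile/dropWhile on the tail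
def pvGroupRows : List (List String) → List (List String)
  | [] => []
  | r :: rs =>
    let key := (PySem.List.pyGet? r 0).getD ""
    let p := fun x : List String => decide ((PySem.List.pyGet? x 0).getD "" = key)
    let run := r :: rs.takeWhile p
    [key,
     PySem.Str.join "\n" (run.map (fun x => (PySem.List.pyGet? x 1).getD "")),
     PySem.Str.join "\n" (run.map (fun x => (PySem.List.pyGet? x 2).getD ""))]
      :: pvGroupRows (rs.dropWhile p)
  termination_by rows => rows.length
  decreasing_by simpa using Nat.lt_succ_of_le (List.length_dropWhile_le _ _)

def find_step_and_expectation_alt (caselist : List String) : List (List String) :=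
  pvGroupRows (caselist.map pvRowOf)

-- ===== PRECONDITION & SPEC =====
-- Pre_ excludes exactly the titles with no underscore: there `case[-2]` raises IndexError in A.
def Pre_find_step_and_expectation (caselist : List String) : Prop :=
  ∀ s ∈ caselist, '_' ∈ s.toList
instance (caselist : List String) : Decidable (Pre_find_step_and_expectation caselist) := by
  unfold Pre_find_step_and_expectation; infer_instance

def pvWitness_find_step_and_expectation : List String := ["login_step1_ok", "login_step2_ok", "pay_step1_fail"]

def Spec_find_step_and_expectation (caselist : List String) (out : List (List String)) : Prop := out = find_step_and_expectation_alt caselist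
instance (caselist : List String) (out : List (List String)) : Decidable (Spec_find_step_and_expectation caselist out) := by unfold Spec_find_step_and_expectation; infer_instance

-- ===== CLAIM (what is proved, stated in full; the proofs are below) =====
def Claim_equal_find_step_and_expectation : Prop := ∀ (caselist : List String), Dom_find_step_and_expectation caselist → Pre_find_step_and_expectation caselist → Spec_find_step_and_expectation caselist (find_step_and_expectation caselist)

-- ===== LEMMAS AND PROOFS =====

-- reference merge: what both phase-2 loops compute, one row at a time
def pvMergeRec (t s e : String) : List (List String) → List (List String)
  | [] => [[t, s, e]]
  | r :: rs =>
    if (PySem.List.pyGet? r 0).getD "" = t then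
      pvMergeRec t (s ++ ("\n" ++ (PySem.List.pyGet? r 1).getD ""))
                   (e ++ ("\n" ++ (PySem.List.pyGet? r 2).getD "")) rs
    else
      [t, s, e] :: pvMergeRec ((PySem.List.pyGet? r 0).getD "")
                              ((PySem.List.pyGet? r 1).getD "")
                              ((PySem.List.pyGet? r 2).getD "") rs

def pvLastKey (t : String) : List (List String) → String
  | [] => t
  | r :: rs => pvLastKey ((PySem.List.pyGet? r 0).getD "") rs

def pvWF (rows : List (List String)) : Prop := ∀ r ∈ rows, ∃ a b c, r = [a, b, c]

theorem pvGet0 (a b c : String) : (PySem.List.pyGet? [a, b, c] 0).getD "" = a := by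
  simp [PySem.List.pyGet?, PySem.List.pyIdx?]

theorem pvGet1 (a b c : String) : (PySem.List.pyGet? [a, b, c] 1).getD "" = b := by
  simp [PySem.List.pyGet?, PySem.List.pyIdx?]

theorem pvGet2 (a b c : String) : (PySem.List.pyGet? [a, b, c] 2).getD "" = c := by
  simp [PySem.List.pyGet?, PySem.List.pyIdx?]

theorem pvGetLast0 (xs : List (List String)) (y : List String) :
    (PySem.List.pyGet? ((PySem.List.pyGet? (xs ++ [y]) (-1)).getD []) 0).getD ""
      = (PySem.List.pyGet? y 0).getD "" := by
  rw [PySem.List.pyGet?_neg_one_append_singleton]; rfl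

theorem pvSetLast_append (xs : List (List String)) (y : List String) (f : List String → List String) :
    pvSetLast (xs ++ [y]) f = xs ++ [f y] := by
  induction xs with
  | nil => rfl
  | cons x xs ih =>
    cases h : xs ++ [y] with
    | nil => exact absurd h (by simp)
    | cons z zs =>
      have hz : pvSetLast (x :: z :: zs) f = x :: pvSetLast (z :: zs) f := rfl
      rw [List.cons_append, h, hz, ← h, ih]; simp

set_option maxRecDepth 4000 in
theorem pvJoin_cons (a b : String) (l : List String) :
    PySem.Str.join "\n" ((a ++ ("\n" ++ b)) :: l) = PySem.Str.join "\n" (a :: b :: l) := by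
  apply String.toList_inj.mp
  simp [PySem.Str.toList_join, PySem.Chars.join]
  cases l <;> simp [List.intercalate, List.intersperse]

theorem pvJoin_single (a : String) : PySem.Str.join "\n" [a] = a := by
  apply String.toList_inj.mp
  simp [PySem.Str.toList_join, PySem.Chars.join, List.intercalate]

-- A's merge loop, characterised: with the accumulator ending in the literal row [t,s,e]
-- and title = t, the fold appends pvMergeRec t s e rows after `done`
theorem pvFoldA (rows : List (List String)) (hwf : pvWF rows) :
    ∀ (done : List (List String)) (t s e : String),
      rows.foldl pvMergeStep (done ++ [[t, s, e]], t)
        = (done ++ pvMergeRec t s e rows, pvLastKey t rows) := by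
  induction rows with
  | nil => intro done t s e; simp [pvMergeRec, pvLastKey]
  | cons r rs ih =>
    intro done t s e
    obtain ⟨a, b, c, rfl⟩ := hwf r (List.mem_cons_self)
    have hwf' : pvWF rs := fun x hx => hwf x (List.mem_cons_of_mem _ hx)
    by_cases hab : a = t
    · subst hab
      have hstep : pvMergeStep (done ++ [[a, s, e]], a) [a, b, c]
          = (done ++ [[a, s ++ ("\n" ++ b), e ++ ("\n" ++ c)]], a) := by
        unfold pvMergeStep
        rw [if_pos (by simp), if_pos (by rw [pvGet0])]
        rw [pvSetLast_append]
        simp only [pvGet0, pvGet1, pvGet2]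
      rw [List.foldl_cons, hstep, ih hwf' done a (s ++ ("\n" ++ b)) (e ++ ("\n" ++ c))]
      have hm : pvMergeRec a s e ([a, b, c] :: rs)
          = pvMergeRec a (s ++ ("\n" ++ b)) (e ++ ("\n" ++ c)) rs := by
        simp [pvMergeRec]
      rw [hm]
      simp [pvLastKey]
    · have hstep : pvMergeStep (done ++ [[t, s, e]], t) [a, b, c]
          = ((done ++ [[t, s, e]]) ++ [[a, b, c]], a) := by
        unfold pvMergeStep
        rw [if_pos (by simp), if_neg (by rw [pvGet0]; exact hab)]
        rw [pvGetLast0, pvGet0]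
      rw [List.foldl_cons, hstep, ih hwf' (done ++ [[t, s, e]]) a b c]
      have hm : pvMergeRec t s e ([a, b, c] :: rs) = [t, s, e] :: pvMergeRec a b c rs := by
        simp [pvMergeRec, hab]
      rw [hm]
      simp [pvLastKey, List.append_assoc]

-- B's run grouping, characterised the same way
theorem pvGroupB (rows : List (List String)) (hwf : pvWF rows) :
    ∀ (t s e : String), pvGroupRows ([t, s, e] :: rows) = pvMergeRec t s e rows := by
  induction rows with
  | nil =>
    intro t s e
    simp [pvGroupRows, pvMergeRec, pvJoin_single]
  | cons r rs ih =>
    intro t s e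
    obtain ⟨a, b, c, rfl⟩ := hwf r (List.mem_cons_self)
    have hwf' : pvWF rs := fun x hx => hwf x (List.mem_cons_of_mem _ hx)
    by_cases hab : a = t
    · subst hab
      have hm : pvMergeRec a s e ([a, b, c] :: rs)
          = pvMergeRec a (s ++ ("\n" ++ b)) (e ++ ("\n" ++ c)) rs := by
        simp [pvMergeRec]
      rw [hm, ← ih hwf' a (s ++ ("\n" ++ b)) (e ++ ("\n" ++ c)), pvGroupRows, pvGroupRows]
      simp [pvJoin_cons]
    · have hm : pvMergeRec t s e ([a, b, c] :: rs) = [t, s, e] :: pvMergeRec a b c rs := by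
        simp [pvMergeRec, hab]
      rw [hm, ← ih hwf' a b c, pvGroupRows]
      simp [pvJoin_single, hab]

theorem pvPhase1 (caselist : List String) :
    caselist.foldl (fun acc title =>
      let case_ := (PySem.Str.split? title "_").getD []
      let casetitle := PySem.Str.join "_" (PySem.List.slice case_ none (some (-2)))
      acc ++ [[casetitle, (PySem.List.pyGet? case_ (-2)).getD "", (PySem.List.pyGet? case_ (-1)).getD ""]]) []
      = caselist.map pvRowOf := by
  have h : ∀ (l : List String) (init : List (List String)),
      l.foldl (fun acc title =>
        let case_ := (PySem.Str.split? title "_").getD []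
        let casetitle := PySem.Str.join "_" (PySem.List.slice case_ none (some (-2)))
        acc ++ [[casetitle, (PySem.List.pyGet? case_ (-2)).getD "", (PySem.List.pyGet? case_ (-1)).getD ""]]) init
        = init ++ l.map pvRowOf := by
    intro l
    induction l with
    | nil => intro init; simp
    | cons x xs ih => intro init; simp [ih, pvRowOf]
  simpa using h caselist []

theorem pvWF_rows (caselist : List String) : pvWF (caselist.map pvRowOf) := by
  intro r hr
  obtain ⟨t, _, rfl⟩ := List.mem_map.mp hr
  exact ⟨_, _, _, rfl⟩

-- ===== VERDICT (by name: the statement is the Claim_ definition above) =====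
theorem find_step_and_expectation_spec : Claim_equal_find_step_and_expectation := by
  intro caselist _ _
  unfold Spec_find_step_and_expectation find_step_and_expectation find_step_and_expectation_alt
  rw [pvPhase1]
  have hwf := pvWF_rows caselist
  cases hrows : caselist.map pvRowOf with
  | nil => simp [pvGroupRows]
  | cons r rs =>
    rw [hrows] at hwf
    obtain ⟨a, b, c, rfl⟩ := hwf _ (List.mem_cons_self)
    have hwf' : pvWF rs := fun x hx => hwf x (List.mem_cons_of_mem _ hx)
    have hstep : pvMergeStep (([] : List (List String)), "") [a, b, c] = ([[a, b, c]], a) := by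
      simp [pvMergeStep, PySem.List.pyGet?_neg_one]
    show (List.foldl pvMergeStep ([], "") ([a, b, c] :: rs)).1 = pvGroupRows ([a, b, c] :: rs)
    rw [List.foldl_cons, hstep,
      show ([[a, b, c]], a) = (([] : List (List String)) ++ [[a, b, c]], a) by simp,
      pvFoldA rs hwf' [] a b c, pvGroupB rs hwf' a b c]
    simp
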